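-- pv_equiv track=rewrite | github.com/socathie/CodeFights | Tournaments/closestSequence.py | closestSequence
-- ===== SOURCE A (Python) =====
-- def closestSequence(a, b):
--     bestDiff = -1
--     maskBound = 1 << len(b)
--
--     for mask in range(maskBound):
--         diff = 0
--         curPos = 0
--         for i in range(len(b)):
--             if (mask & (1 << i)) != 0:
--                 diff += abs(b[i]-a[curPos])
--                 curPos += 1
--                 if curPos == len(a):
--                     break
--         if curPos == len(a) and (bestDiff == -1 or diff < bestDiff):
--             bestDiff = diff
--
--     return bestDiff
-- ===== SOURCE B (Python) =====
-- def closestSequence(a, b):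
--     # DP over suffixes: nxt[j] = min cost of matching the current a-suffix
--     # into b[j:], None = impossible.  O(len(a)*len(b)).
--     n = len(b)
--     nxt = [0] * (n + 1)              # empty a-suffix costs 0 everywhere
--     for x in reversed(a):
--         cur = [None] * (n + 1)       # cur[n] stays None: x cannot match into empty b-suffix
--         for j in range(n - 1, -1, -1):
--             best = cur[j + 1]        # skip b[j]
--             p = nxt[j + 1]
--             if p is not None:        # pair x with b[j]
--                 c = p + abs(x - b[j])
--                 if best is None or c < best:
--                     best = c
--             cur[j] = best
--         nxt = cur
--     return -1 if nxt[0] is None else nxt[0]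
-- ===== Notes on version B (the rewrite author's own statement) =====
-- stated objective: faster
-- what changed: Replaces the exponential enumeration of all bitmasks of b (recomputing each matching's cost from scratch) with a prefix/suffix dynamic program dp[i][j] = min(skip b[j], pair a[i] with b[j]).
import Mathlib
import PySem

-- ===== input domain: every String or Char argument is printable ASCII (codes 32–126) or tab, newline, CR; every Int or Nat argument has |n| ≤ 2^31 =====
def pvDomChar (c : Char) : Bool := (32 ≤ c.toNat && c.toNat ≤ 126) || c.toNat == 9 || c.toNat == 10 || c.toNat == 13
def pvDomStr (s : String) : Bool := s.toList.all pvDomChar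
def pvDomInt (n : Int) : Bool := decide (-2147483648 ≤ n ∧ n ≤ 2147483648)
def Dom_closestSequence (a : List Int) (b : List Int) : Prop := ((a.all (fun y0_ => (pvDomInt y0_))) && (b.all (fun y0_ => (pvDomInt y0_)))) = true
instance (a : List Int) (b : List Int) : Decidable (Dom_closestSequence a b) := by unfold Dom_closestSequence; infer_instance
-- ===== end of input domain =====

-- B replaces A's exponential enumeration of all bitmasks of b by an O(len(a)*len(b))
-- dynamic program over suffixes (min of: skip b[j], or pair a[i] with b[j]).

-- ===== PORT A =====
-- inner 'for i in range(len(b))' loop of A, with its early 'break'; mask, i, curPos are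
-- nonnegative throughout the Python run, so they are carried as Nat (bit test = testBit;
-- exact here); list indexing is total via pyGet?/getD (every access is in range when a ≠ []).
def pvInnerA (a b : List Int) (mask : Nat) (i : Nat) (diff : Int) (curPos : Nat) : Int × Nat :=
  if i < b.length then
    if mask.testBit i then
      let diff' := diff + |(PySem.List.pyGet? b (i : Int)).getD 0 - (PySem.List.pyGet? a (curPos : Int)).getD 0|
      let curPos' := curPos + 1
      if curPos' = a.length then (diff', curPos')
      else pvInnerA a b mask (i + 1) diff' curPos'
    else pvInnerA a b mask (i + 1) diff curPos
  else (diff, curPos)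
termination_by b.length - i

-- 'for mask in range(1 << len(b))' with bestDiff starting at -1
def closestSequence (a : List Int) (b : List Int) : Int :=
  (List.range (2 ^ b.length)).foldl
    (fun bestDiff mask =>
      let r := pvInnerA a b mask 0 0 0
      if r.2 = a.length ∧ (bestDiff = -1 ∨ r.1 < bestDiff) then r.1 else bestDiff)
    (-1)

-- ===== PORT B =====
-- one pass of B's inner 'for j in range(n-1, -1, -1)' loop: building cur right-to-left is
-- the structural cons-recursion over b (position j) and nxt (nxt = nxtj :: nxt', so
-- nxt[j+1] is nxt'.headD); None = Option.none.
def pvRowB (x : Int) : List Int → List (Option Int) → List (Option Int)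
  | [], _ => [none]
  | _ :: _, [] => [none]        -- unreachable: nxt always has length b.length + 1
  | y :: b', _ :: nxt' =>
    let rest := pvRowB x b' nxt'
    let best := rest.headD none                 -- best = cur[j+1] (skip b[j])
    let best := match nxt'.headD none with      -- p = nxt[j+1]
      | none => best
      | some p =>
        let c := p + |x - y|
        match best with
        | none => some c
        | some bv => if c < bv then some c else some bv
    best :: rest

def closestSequence_alt (a : List Int) (b : List Int) : Int :=
  -- 'for x in reversed(a)' = foldr over a; initial nxt = [0]*(n+1); final answer nxt[0]
  match (a.foldr (fun x nxt => pvRowB x b nxt)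
      (List.replicate (b.length + 1) (some 0))).headD none with
  | none => -1
  | some v => v

-- ===== PRECONDITION & SPEC =====
-- Pre_ excludes exactly the inputs where Python A raises IndexError: a = [] with b ≠ []
-- (every mask with a set bit reads a[0] from the empty list).
def Pre_closestSequence (a : List Int) (b : List Int) : Prop := a ≠ [] ∨ b = []
instance (a : List Int) (b : List Int) : Decidable (Pre_closestSequence a b) := by
  unfold Pre_closestSequence; infer_instance
def pvWitness_closestSequence : List Int × List Int := ([1], [2, 4])

def Spec_closestSequence (a : List Int) (b : List Int) (out : Int) : Prop := out = closestSequence_alt a b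
instance (a : List Int) (b : List Int) (out : Int) : Decidable (Spec_closestSequence a b out) := by unfold Spec_closestSequence; infer_instance

-- ===== CLAIM (what is proved, stated in full; the proofs are below) =====
def Claim_equal_closestSequence : Prop := ∀ (a : List Int) (b : List Int), Dom_closestSequence a b → Pre_closestSequence a b → Spec_closestSequence a b (closestSequence a b)

-- ===== LEMMAS AND PROOFS =====

-- min on Option Int with none = +infinity (keeps the left value on ties)
def omin : Option Int → Option Int → Option Int
  | none, v => v
  | some s, none => some s
  | some s, some c => if c < s then some c else some s

def mfold (l : List (Option Int)) : Option Int := l.foldr omin none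

-- the common value both programs compute: min cost of matching all of a into a subsequence
-- of b (none = impossible), peeling the front of b (skip y, or pair it with x)
def pvR : List Int → List Int → Option Int
  | [], _ => some 0
  | _ :: _, [] => none
  | x :: a', y :: b' => omin (pvR (x :: a') b') ((pvR a' b').map (· + |y - x|))

-- A's inner loop as a pure walk over a bit list zipped with b ('break' = the a = [] arms)
def pvG : List (Bool × Int) → List Int → Option Int
  | _, [] => some 0
  | [], _ :: _ => none
  | (c, y) :: rest, x :: a' =>
    if c then (pvG rest a').map (· + |y - x|) else pvG rest (x :: a')

-- all bit lists of length n
def pvE : Nat → List (List Bool)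
  | 0 => [[]]
  | n + 1 => (pvE n).map (List.cons false) ++ (pvE n).map (List.cons true)

def pvBits (mask : Nat) (i : Nat) (k : Nat) : List Bool :=
  (List.range k).map (fun j => mask.testBit (i + j))

def pvVal (a : List Int) (r : Int × Nat) : Option Int :=
  if r.2 = a.length then some r.1 else none

def pvEnc : Option Int → Int
  | none => -1
  | some v => v

-- ---- omin algebra ----
theorem omin_none_right (u : Option Int) : omin u none = u := by cases u <;> rfl

theorem omin_some_some (s c : Int) : omin (some s) (some c) = some (min c s) := by
  simp only [omin]
  split_ifs <;> (congr 1; omega)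

theorem omin_comm (u v : Option Int) : omin u v = omin v u := by
  cases u <;> cases v <;> try rfl
  rw [omin_some_some, omin_some_some, min_comm]

theorem omin_assoc (u v w : Option Int) : omin (omin u v) w = omin u (omin v w) := by
  cases w with
  | none => rw [omin_none_right, omin_none_right]
  | some c =>
    cases v with
    | none => rw [omin_none_right]; rfl
    | some bb =>
      cases u with
      | none => rfl
      | some aa =>
        rw [omin_some_some, omin_some_some, omin_some_some, omin_some_some]
        congr 1
        omega

theorem omin_map_add (u v : Option Int) (k : Int) :
    omin (u.map (· + k)) (v.map (· + k)) = (omin u v).map (· + k) := by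
  cases u <;> cases v <;> try rfl
  simp only [Option.map_some]
  rw [omin_some_some, omin_some_some]
  simp only [Option.map_some]
  congr 1
  simp only [min_def]
  split_ifs <;> omega

-- ---- mfold facts ----
theorem mfold_cons (x : Option Int) (l : List (Option Int)) :
    mfold (x :: l) = omin x (mfold l) := rfl

theorem mfold_append (l1 l2 : List (Option Int)) :
    mfold (l1 ++ l2) = omin (mfold l1) (mfold l2) := by
  induction l1 with
  | nil => simp [mfold, omin]
  | cons x l ih => rw [List.cons_append, mfold_cons, ih, mfold_cons, omin_assoc]

theorem mfold_map_congr {α : Type} (l : List α) (f g : α → Option Int)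
    (h : ∀ x ∈ l, f x = g x) : mfold (l.map f) = mfold (l.map g) := by
  induction l with
  | nil => rfl
  | cons x l ih =>
    rw [List.map_cons, List.map_cons, mfold_cons, mfold_cons,
        h x (by simp), ih (fun y hy => h y (by simp [hy]))]

theorem mfold_map_map_add (l : List (Option Int)) (k : Int) :
    mfold (l.map (Option.map (· + k))) = (mfold l).map (· + k) := by
  induction l with
  | nil => rfl
  | cons x l ih => rw [List.map_cons, mfold_cons, ih, mfold_cons, omin_map_add]

theorem mfold_const_zero {α : Type} (l : List α) (f : α → Option Int)
    (h : ∀ x ∈ l, f x = some 0) (hne : l ≠ []) : mfold (l.map f) = some 0 := by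
  induction l with
  | nil => exact absurd rfl hne
  | cons x l ih =>
    rw [List.map_cons, mfold_cons, h x (by simp)]
    cases l with
    | nil => rfl
    | cons y l' =>
      rw [ih (fun z hz => h z (by simp [hz])) (by simp)]
      simp [omin]

theorem mfold_absorb (l : List (Option Int)) (x : Option Int) (hx : x ∈ l) :
    omin (mfold l) x = mfold l := by
  induction l with
  | nil => simp at hx
  | cons y l ih =>
    rcases List.mem_cons.mp hx with h | h
    · subst h
      rw [mfold_cons, omin_assoc, omin_comm (mfold l) x, ← omin_assoc]
      have hxx : omin x x = x := by cases x <;> simp [omin]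
      rw [hxx, ← mfold_cons]
    · rw [mfold_cons, omin_assoc, ih h, ← mfold_cons]

theorem mfold_subset (l1 l2 : List (Option Int)) (h : ∀ x ∈ l1, x ∈ l2) :
    omin (mfold l2) (mfold l1) = mfold l2 := by
  induction l1 with
  | nil => exact omin_none_right _
  | cons x l ih =>
    rw [mfold_cons, ← omin_assoc, mfold_absorb l2 x (h x (by simp)),
        ih (fun y hy => h y (by simp [hy]))]

theorem mfold_same (l1 l2 : List (Option Int)) (h1 : ∀ x ∈ l1, x ∈ l2)
    (h2 : ∀ x ∈ l2, x ∈ l1) : mfold l1 = mfold l2 := by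
  have a1 := mfold_subset l1 l2 h1
  have a2 := mfold_subset l2 l1 h2
  rw [← a1, omin_comm, a2]

-- ---- pvG facts ----
theorem pvG_nil_a (p : List (Bool × Int)) : pvG p [] = some 0 := by
  cases p with
  | nil => rfl
  | cons hd tl => cases hd; rfl

theorem pvG_skip (rest : List (Bool × Int)) (y : Int) (a : List Int) :
    pvG ((false, y) :: rest) a = pvG rest a := by
  cases a with
  | nil => rw [pvG_nil_a, pvG_nil_a]
  | cons x a' => rfl

theorem pvG_pair (rest : List (Bool × Int)) (y x : Int) (a' : List Int) :
    pvG ((true, y) :: rest) (x :: a') = (pvG rest a').map (· + |y - x|) := by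
  simp [pvG]

theorem pvG_nonneg (p : List (Bool × Int)) (a : List Int) (c : Int)
    (h : pvG p a = some c) : 0 ≤ c := by
  induction p generalizing a c with
  | nil =>
    cases a with
    | nil => simp [pvG] at h; omega
    | cons x a' => simp [pvG] at h
  | cons hd tl ih =>
    cases a with
    | nil => rw [pvG_nil_a] at h; simp at h; omega
    | cons x a' =>
      obtain ⟨bit, y⟩ := hd
      by_cases hb : bit
      · simp [pvG, hb] at h
        obtain ⟨d, hd2, hdc⟩ := h
        have h1 := ih a' d hd2
        have h2 := abs_nonneg (y - x)
        omega
      · simp [pvG, hb] at h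
        exact ih _ _ h

-- ---- pvE facts ----
theorem mem_pvE (n : Nat) (bits : List Bool) : bits ∈ pvE n ↔ bits.length = n := by
  induction n generalizing bits with
  | zero => cases bits <;> simp [pvE]
  | succ n ih =>
    cases bits with
    | nil => simp [pvE, ih]
    | cons c rest => cases c <;> simp [pvE, ih]

theorem pvE_ne_nil (n : Nat) : pvE n ≠ [] := by
  intro h
  have := (mem_pvE n (List.replicate n false)).mpr (by simp)
  rw [h] at this
  simp at this

-- ---- bits of a mask ----
theorem pvBits_succ (mask i k : Nat) :
    pvBits mask i (k + 1) = mask.testBit i :: pvBits mask (i + 1) k := by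
  simp only [pvBits, List.range_succ_eq_map, List.map_map, Function.comp, List.map_cons]
  rw [List.cons.injEq]
  constructor
  · rfl
  · apply List.map_congr_left; intro j hj
    show mask.testBit (i + (j + 1)) = mask.testBit (i + 1 + j)
    have h' : i + (j + 1) = i + 1 + j := by omega
    rw [h']

theorem pvBits_len (mask i k : Nat) : (pvBits mask i k).length = k := by simp [pvBits]

theorem pvE_covers (n : Nat) (bits : List Bool) (h : bits ∈ pvE n) :
    ∃ m, m < 2 ^ n ∧ pvBits m 0 n = bits := by
  induction n generalizing bits with
  | zero =>
    simp [pvE] at h; subst h; exact ⟨0, by norm_num, rfl⟩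
  | succ n ih =>
    rw [mem_pvE] at h
    cases bits with
    | nil => simp at h
    | cons c rest =>
      obtain ⟨m', hm', hbits⟩ := ih rest ((mem_pvE n rest).mpr (by simpa using h))
      refine ⟨2 * m' + (if c then 1 else 0), by split_ifs <;> (rw [pow_succ]; omega), ?_⟩
      rw [pvBits_succ]
      have hdiv : (2 * m' + (if c then 1 else 0)) / 2 = m' := by split_ifs <;> omega
      have h1 : (2 * m' + (if c then 1 else 0)).testBit 0 = c := by
        rw [Nat.testBit_zero]
        cases c <;> simp [Nat.testBit_zero] <;> omega
      have h2 : pvBits (2 * m' + (if c then 1 else 0)) (0 + 1) n = rest := by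
        rw [← hbits]
        simp only [pvBits]
        apply List.map_congr_left
        intro j hj
        rw [Nat.add_comm 1 j, Nat.testBit_succ, hdiv]
        rw [show (0 : Nat) + j = j from by omega]
      rw [h1, h2]

-- ---- minBits: minimum over all bit lists = pvR ----
theorem minBits (bv : List Int) (a : List Int) :
    mfold ((pvE bv.length).map (fun bits => pvG (List.zip bits bv) a)) = pvR a bv := by
  induction bv generalizing a with
  | nil => cases a <;> simp [pvE, mfold, omin, pvG, pvR]
  | cons y bv' ih =>
    show mfold ((pvE (bv'.length + 1)).map _) = _
    rw [show pvE (bv'.length + 1)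
          = (pvE bv'.length).map (List.cons false) ++ (pvE bv'.length).map (List.cons true) from rfl,
        List.map_append, mfold_append, List.map_map, List.map_map]
    have hfalse :
        mfold ((pvE bv'.length).map ((fun bits => pvG (List.zip bits (y :: bv')) a) ∘ List.cons false))
          = pvR a bv' := by
      rw [mfold_map_congr _ _ (fun bits => pvG (List.zip bits bv') a)
            (by intro bits _; simp only [Function.comp, List.zip_cons_cons]; exact pvG_skip _ _ _)]
      exact ih a
    rw [hfalse]
    cases a with
    | nil =>
      rw [mfold_const_zero _ _ (fun bits _ => by
            simp only [Function.comp, List.zip_cons_cons]; exact pvG_nil_a _) (pvE_ne_nil _)]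
      rw [show pvR ([] : List Int) bv' = some 0 from by cases bv' <;> rfl]
      rw [show pvR ([] : List Int) (y :: bv') = some 0 from rfl]
      simp [omin]
    | cons x a' =>
      have htrue :
          mfold ((pvE bv'.length).map ((fun bits => pvG (List.zip bits (y :: bv')) (x :: a')) ∘ List.cons true))
            = (pvR a' bv').map (· + |y - x|) := by
        rw [mfold_map_congr _ _ (fun bits => (pvG (List.zip bits bv') a').map (· + |y - x|))
              (by intro bits _; simp only [Function.comp, List.zip_cons_cons]; rfl)]
        rw [show (pvE bv'.length).map (fun bits => (pvG (List.zip bits bv') a').map (· + |y - x|))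
              = ((pvE bv'.length).map (fun bits => pvG (List.zip bits bv') a')).map (Option.map (· + |y - x|)) from by
              rw [List.map_map]; rfl]
        rw [mfold_map_map_add, ih a']
      rw [htrue]
      rfl

-- ---- A inner loop characterisation ----
theorem inner_eq (a b : List Int) (mask : Nat) (bv : List Int) (i : Nat)
    (hlen : i + bv.length = b.length) (hdrop : bv = b.drop i)
    (diff : Int) (p : Nat) (hp : p < a.length) :
    pvVal a (pvInnerA a b mask i diff p)
      = (pvG (List.zip (pvBits mask i bv.length) bv) (a.drop p)).map (· + diff) := by
  induction bv generalizing i diff p with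
  | nil =>
    have hi : ¬ i < b.length := by simp at hlen; omega
    rw [pvInnerA]
    simp only [hi, if_false]
    obtain ⟨x, arest, hx⟩ : ∃ x arest, a.drop p = x :: arest := by
      rcases hd : a.drop p with _ | ⟨x, arest⟩
      · rw [List.drop_eq_nil_iff] at hd; omega
      · exact ⟨x, arest, rfl⟩
    rw [hx]
    simp [pvVal, pvG, pvBits]
    omega
  | cons y bv' ih =>
    have hi : i < b.length := by simp at hlen; omega
    have hbi : b[i]? = some y := by
      have h0 : (List.drop i b)[0]? = some y := by rw [← hdrop]; rfl
      rw [List.getElem?_drop] at h0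
      simpa using h0
    have hbdrop : b.drop (i + 1) = bv' := by
      rw [← List.tail_drop, ← hdrop]
      rfl
    have hxa : a.drop p = a[p] :: a.drop (p + 1) := List.drop_eq_getElem_cons hp
    have hpa : PySem.List.pyGet? a (p : Int) = some a[p] := by
      rw [PySem.List.pyGet?_natCast]; exact List.getElem?_eq_getElem hp
    have hpb : PySem.List.pyGet? b (i : Int) = some y := by
      rw [PySem.List.pyGet?_natCast]; exact hbi
    rw [pvInnerA]
    rw [if_pos hi]
    simp only [hpa, hpb, Option.getD_some]
    rw [show (y :: bv').length = bv'.length + 1 from rfl, pvBits_succ, List.zip_cons_cons, hxa]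
    cases hb : mask.testBit i with
    | true =>
      rw [if_pos rfl]
      by_cases hpc : p + 1 = a.length
      · rw [if_pos hpc]
        have hnil : a.drop (p + 1) = [] := by rw [List.drop_eq_nil_iff]; omega
        rw [hnil, pvG_pair, pvG_nil_a]
        simp only [pvVal, hpc, Option.map_some]
        rw [if_pos trivial]
        congr 1
        ring
      · rw [if_neg hpc]
        rw [ih (i + 1) (by simp at hlen ⊢; omega) hbdrop.symm (diff + |y - a[p]|) (p + 1) (by omega)]
        rw [pvG_pair]
        cases pvG (List.zip (pvBits mask (i + 1) bv'.length) bv') (a.drop (p + 1)) with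
        | none => rfl
        | some c =>
          simp only [Option.map_some]
          congr 1
          ring
    | false =>
      rw [if_neg (by simp)]
      rw [ih (i + 1) (by simp at hlen ⊢; omega) hbdrop.symm diff p hp]
      rw [pvG_skip, ← hxa]

-- ---- A outer loop characterisation ----
theorem outer_eq (a b : List Int) (l : List Nat) (acc : Option Int)
    (hacc : ∀ d, acc = some d → 0 ≤ d)
    (hv : ∀ m ∈ l, ∀ c, pvVal a (pvInnerA a b m 0 0 0) = some c → 0 ≤ c) :
    l.foldl
      (fun bestDiff mask =>
        let r := pvInnerA a b mask 0 0 0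
        if r.2 = a.length ∧ (bestDiff = -1 ∨ r.1 < bestDiff) then r.1 else bestDiff)
      (pvEnc acc)
    = pvEnc (omin acc (mfold (l.map (fun m => pvVal a (pvInnerA a b m 0 0 0))))) := by
  induction l generalizing acc with
  | nil => rw [List.foldl_nil, List.map_nil]; rw [show mfold [] = none from rfl, omin_none_right]
  | cons m l' ih =>
    rw [List.foldl_cons, List.map_cons, mfold_cons, ← omin_assoc]
    set r := pvInnerA a b m 0 0 0 with hr
    have hstep :
        (if r.2 = a.length ∧ (pvEnc acc = -1 ∨ r.1 < pvEnc acc) then r.1 else pvEnc acc)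
          = pvEnc (omin acc (pvVal a r)) := by
      by_cases h2 : r.2 = a.length
      · have hvm : pvVal a r = some r.1 := by simp [pvVal, h2]
        have hr1 : 0 ≤ r.1 := hv m (by simp) r.1 hvm
        rw [hvm]
        cases acc with
        | none => simp [pvEnc, h2, omin]
        | some d =>
          have hd : 0 ≤ d := hacc d rfl
          simp only [pvEnc, omin]
          by_cases hlt : r.1 < d
          · rw [if_pos ⟨h2, Or.inr hlt⟩, if_pos hlt]
          · rw [if_neg (by rintro ⟨_, h | h⟩ <;> omega), if_neg hlt]
      · have hvm : pvVal a r = none := by simp [pvVal, h2]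
        rw [hvm, omin_none_right, if_neg (by rintro ⟨h, _⟩; exact h2 h)]
    rw [hstep]
    exact ih (omin acc (pvVal a r))
      (by
        intro d hd
        cases hval2 : pvVal a r with
        | none =>
          rw [hval2, omin_none_right] at hd
          exact hacc d hd
        | some c =>
          have hc : 0 ≤ c := hv m (by simp) c (by rw [← hr]; exact hval2)
          cases hacc2 : acc with
          | none =>
            rw [hacc2, hval2] at hd
            simp [omin] at hd
            omega
          | some e =>
            have he : 0 ≤ e := hacc e hacc2
            rw [hacc2, hval2, omin_some_some] at hd
            simp at hd
            omega)
      (fun m' hm' => hv m' (by simp [hm']))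

-- ---- B characterisation ----
def pvRtab (as : List Int) : List Int → List (Option Int)
  | [] => [pvR as []]
  | y :: b' => pvR as (y :: b') :: pvRtab as b'

theorem pvRtab_head (as b : List Int) : (pvRtab as b).headD none = pvR as b := by
  cases b <;> rfl

theorem replicate_eq_Rtab (b : List Int) :
    List.replicate (b.length + 1) (some 0 : Option Int) = pvRtab [] b := by
  induction b with
  | nil => rfl
  | cons y b' ih =>
    rw [show (y :: b').length + 1 = (b'.length + 1) + 1 from rfl, List.replicate_succ, ih]
    rw [show pvRtab [] (y :: b') = pvR [] (y :: b') :: pvRtab [] b' from rfl]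
    rfl

theorem rowB_tab (x : Int) (as b : List Int) :
    pvRowB x b (pvRtab as b) = pvRtab (x :: as) b := by
  induction b with
  | nil => rfl
  | cons y b' ih =>
    rw [show pvRtab as (y :: b') = pvR as (y :: b') :: pvRtab as b' from rfl]
    rw [pvRowB, ih, pvRtab_head]
    rw [show pvRtab (x :: as) (y :: b') = pvR (x :: as) (y :: b') :: pvRtab (x :: as) b' from rfl]
    congr 1
    rw [pvRtab_head]
    rw [show pvR (x :: as) (y :: b') = omin (pvR (x :: as) b') ((pvR as b').map (· + |y - x|)) from rfl]
    rw [abs_sub_comm x y]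
    cases pvR as b' with
    | none => simp [omin_none_right]
    | some p =>
      cases pvR (x :: as) b' with
      | none => rfl
      | some bv => rfl

theorem altB_eq (a b : List Int) : closestSequence_alt a b = pvEnc (pvR a b) := by
  unfold closestSequence_alt
  have hfold : a.foldr (fun x nxt => pvRowB x b nxt)
      (List.replicate (b.length + 1) (some 0)) = pvRtab a b := by
    induction a with
    | nil => exact replicate_eq_Rtab b
    | cons x a' ih => rw [List.foldr_cons, ih, rowB_tab]
  rw [hfold, pvRtab_head]
  cases pvR a b <;> rfl

-- ---- main ----
theorem A_eq (a b : List Int) (ha : a ≠ []) : closestSequence a b = pvEnc (pvR a b) := by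
  have hlen : 0 < a.length := List.length_pos_iff.mpr ha
  have hval : ∀ m : Nat, pvVal a (pvInnerA a b m 0 0 0)
      = pvG (List.zip (pvBits m 0 b.length) b) a := by
    intro m
    rw [inner_eq a b m b 0 (by simp) (by simp) 0 0 hlen]
    simp only [List.drop_zero]
    cases pvG (List.zip (pvBits m 0 b.length) b) a with
    | none => rfl
    | some c => simp
  unfold closestSequence
  have h1 := outer_eq a b (List.range (2 ^ b.length)) none (by intro d h; cases h)
      (by intro m _ c hc; rw [hval m] at hc; exact pvG_nonneg _ _ _ hc)
  refine h1.trans ?_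
  show pvEnc (mfold ((List.range (2 ^ b.length)).map
      (fun m => pvVal a (pvInnerA a b m 0 0 0)))) = _
  congr 1
  rw [mfold_map_congr _ _ (fun m => pvG (List.zip (pvBits m 0 b.length) b) a)
        (fun m _ => hval m)]
  rw [show (List.range (2 ^ b.length)).map (fun m => pvG (List.zip (pvBits m 0 b.length) b) a)
        = ((List.range (2 ^ b.length)).map (fun m => pvBits m 0 b.length)).map
            (fun bits => pvG (List.zip bits b) a) from by rw [List.map_map]; rfl]
  rw [mfold_same _ ((pvE b.length).map (fun bits => pvG (List.zip bits b) a))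
        (by
          intro x hx
          simp only [List.mem_map] at hx ⊢
          obtain ⟨bits, hbits, hx⟩ := hx
          simp only [List.mem_map, List.mem_range] at hbits
          obtain ⟨m, _, hm⟩ := hbits
          exact ⟨bits, (mem_pvE _ _).mpr (by rw [← hm, pvBits_len]), hx⟩)
        (by
          intro x hx
          simp only [List.mem_map] at hx ⊢
          obtain ⟨bits, hbits, hx⟩ := hx
          obtain ⟨m, hm, hmb⟩ := pvE_covers _ _ hbits
          exact ⟨bits, ⟨m, List.mem_range.mpr hm, hmb⟩, hx⟩)]
  rw [minBits]

-- ===== VERDICT (by name: the statement is the Claim_ definition above) =====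
theorem closestSequence_spec : Claim_equal_closestSequence := by
  intro a b _ hpre
  unfold Spec_closestSequence
  rw [altB_eq]
  cases a with
  | nil =>
    rcases hpre with h | h
    · exact absurd rfl h
    · subst h
      simp [closestSequence, List.range_succ, pvInnerA, pvR, pvEnc]
  | cons x a' => exact A_eq _ _ (by simp)
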